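-- pv_equiv track=rewrite | github.com/esarmstrong/pyramid_words | pyramid.py | pyramidify
-- ===== SOURCE A (Python) =====
-- from collections import Counter
--
-- def pyramidify(word):
--     '''This function sorts the word by character count
--     and checks to see if the word follows the pyramid structure'''
--     count = sorted(Counter(word).items() ,  key=lambda x: x[1])
--     if(count[0][1] == 1 and (all(count[i][1] == count[i + 1][1]-1 for i in range(len(count)-1)))):
--         result = "This IS a pyramid word!\n"
--         for freq in count:
--             result += freq[0]*freq[1]+'\n'
--         return result
--     else:
--         return "This is NOT a pyramid word!\n"
-- ===== SOURCE B (Python) =====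
-- from collections import Counter
--
-- def pyramidify(word):
--     counts = Counter(word)
--     k = len(counts)
--     slots = [None] * (k + 1)
--     for ch, n in counts.items():
--         if n > k or slots[n] is not None:
--             return "This is NOT a pyramid word!\n"
--         slots[n] = ch
--     result = "This IS a pyramid word!\n"
--     for n in range(1, k + 1):
--         result += slots[n] * n + '\n'
--     return result
-- ===== Notes on version B (the rewrite author's own statement) =====
-- stated objective: alternative
-- what changed: B never sorts: it validates the counts by pigeonhole bucket placement into a slot array of size k+1 (early-returning on a count > k or an already-occupied slot) and emits the rows by walking the slot array for n=1..k, instead of A's sort of the counter items followed by a pairwise +1 scan over the sorted pairs.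
import Mathlib
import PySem

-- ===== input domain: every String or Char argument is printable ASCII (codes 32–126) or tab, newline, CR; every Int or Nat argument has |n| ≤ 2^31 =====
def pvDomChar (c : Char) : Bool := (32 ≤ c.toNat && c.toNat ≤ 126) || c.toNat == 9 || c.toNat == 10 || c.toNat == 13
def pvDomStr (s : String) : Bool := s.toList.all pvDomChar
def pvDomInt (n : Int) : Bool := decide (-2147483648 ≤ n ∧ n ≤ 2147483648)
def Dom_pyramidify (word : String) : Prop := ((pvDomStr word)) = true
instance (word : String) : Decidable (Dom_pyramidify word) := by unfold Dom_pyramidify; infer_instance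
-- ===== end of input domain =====

-- B validates by pigeonhole bucket placement into a slot array (no sorting anywhere) and emits the
-- rows by walking the slot array, instead of A's sort + pairwise +1 scan (objective: alternative).

-- ===== PORT A =====
def pyramidify (word : String) : String :=
  let count := PySem.List.sorted (PySem.Dict.counter word.toList).items (fun p => p.2) false
  match PySem.List.pyGet? count 0 with
  | none => ""   -- Python raises IndexError here (count[0] on empty word); excluded by Pre_
  | some c0 =>
    if c0.2 = 1 ∧ (∀ i ∈ PySem.List.pyRange 0 ((count.length : Int) - 1) 1,
        (PySem.List.pyGetD count i ('a', 0)).2 = (PySem.List.pyGetD count (i + 1) ('a', 0)).2 - 1)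
    then String.ofList (count.foldl
          (fun res p => res ++ List.replicate p.2.toNat p.1 ++ ['\n'])
          "This IS a pyramid word!\n".toList)
    else "This is NOT a pyramid word!\n"

-- ===== PORT B =====
-- B's for-loop with its early `return`: place each (ch, n) into slot n; none = the early return.
def pyrFill : List (Char × Int) → List (Option Char) → Int → Option (List (Option Char))
  | [], slots, _ => some slots
  | (ch, n) :: rest, slots, k =>
    if n > k ∨ slots.getD n.toNat none ≠ none then none
    else pyrFill rest (slots.set n.toNat (some ch)) k

def pyramidify_alt (word : String) : String :=
  let counts := PySem.Dict.counter word.toList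
  let k := counts.size
  match pyrFill counts.items (List.replicate (k + 1) none) (k : Int) with
  | none => "This is NOT a pyramid word!\n"
  | some slots =>
    String.ofList ((PySem.List.pyRange 1 ((k : Int) + 1) 1).foldl
      (fun res n => res ++ List.replicate n.toNat ((slots.getD n.toNat none).getD ' ') ++ ['\n'])
      "This IS a pyramid word!\n".toList)
    -- slots[n] is never None in this branch; .getD ' ' is the unreachable default

-- ===== PRECONDITION & SPEC =====
-- Pre_ excludes only the empty word, on which A raises IndexError (count[0] of an empty list).
def Pre_pyramidify (word : String) : Prop := word.toList ≠ []
instance (word : String) : Decidable (Pre_pyramidify word) := by unfold Pre_pyramidify; infer_instance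
def pvWitness_pyramidify : String := "abb"

def Spec_pyramidify (word : String) (out : String) : Prop := out = pyramidify_alt word
instance (word : String) (out : String) : Decidable (Spec_pyramidify word out) := by unfold Spec_pyramidify; infer_instance

-- ===== CLAIM (what is proved, stated in full; the proofs are below) =====
def Claim_equal_pyramidify : Prop := ∀ (word : String), Dom_pyramidify word → Pre_pyramidify word → Spec_pyramidify word (pyramidify word)

-- ===== LEMMAS AND PROOFS =====

-- getD/set on the slot list
lemma pv_getD_set_self (l : List (Option Char)) (i : Nat) (h : i < l.length) (a : Option Char) :
    (l.set i a).getD i none = a := by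
  simp [List.getD, h]

lemma pv_getD_set_ne (l : List (Option Char)) (i j : Nat) (h : i ≠ j) (a : Option Char) :
    (l.set i a).getD j none = l.getD j none := by
  simp [List.getD, List.getElem?_set_ne h]

-- A nonempty Int list that starts at 1 and rises by exactly 1 each step IS range(1, len+1), and conversely.
lemma pv_steps_iff_range (L : List Int) (h0 : 0 < L.length) :
    (L[0]'h0 = 1 ∧ ∀ j (h : j + 1 < L.length), L[j+1] = L[j]'(by omega) + 1)
      ↔ L = PySem.List.pyRange 1 ((L.length : Int) + 1) 1 := by
  constructor
  · rintro ⟨h1, hstep⟩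
    have hall : ∀ j (h : j < L.length), L[j] = 1 + (j : Int) := by
      intro j
      induction j with
      | zero => intro h; simpa using h1
      | succ n ih =>
        intro h
        rw [hstep n h, ih (by omega)]
        push_cast; ring
    apply List.ext_getElem
    · simp [PySem.List.length_pyRange_one]
    · intro j h1' h2'
      rw [PySem.List.getElem_pyRange_one, hall j h1']
  · intro hL
    constructor
    · rw [List.getElem_of_eq hL, PySem.List.getElem_pyRange_one]; simp
    · intro j h
      rw [List.getElem_of_eq hL, List.getElem_of_eq hL,
        PySem.List.getElem_pyRange_one, PySem.List.getElem_pyRange_one]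
      push_cast; ring

-- A's indexed all(...) over range(len-1) is the +1-step condition on the frequency column.
lemma pv_all_iff_steps (s : List (Char × Int)) :
    (∀ i ∈ PySem.List.pyRange 0 ((s.length : Int) - 1) 1,
        (PySem.List.pyGetD s i ('a', 0)).2 = (PySem.List.pyGetD s (i + 1) ('a', 0)).2 - 1)
    ↔ ∀ j (h : j + 1 < s.length), (s[j+1]'h).2 = (s[j]'(by omega)).2 + 1 := by
  constructor
  · intro hall j h
    have hj := hall (j : Int) (by rw [PySem.List.mem_pyRange_one]; omega)
    rw [PySem.List.pyGetD_eq_getElem s _ (by omega) (by omega),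
        PySem.List.pyGetD_eq_getElem s _ (by omega) (by omega)] at hj
    have e1 : ((j : Int)).toNat = j := by omega
    have e2 : ((j : Int) + 1).toNat = j + 1 := by omega
    simp only [e1, e2] at hj
    omega
  · intro hall i hi
    rw [PySem.List.mem_pyRange_one] at hi
    lift i to Nat using hi.1 with j
    have h : j + 1 < s.length := by omega
    have hj := hall j h
    rw [PySem.List.pyGetD_eq_getElem s _ (by omega) (by omega),
        PySem.List.pyGetD_eq_getElem s _ (by omega) (by omega)]
    have e1 : ((j : Int)).toNat = j := by omega
    have e2 : ((j : Int) + 1).toNat = j + 1 := by omega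
    simp only [e1, e2]
    omega

-- pyrFill characterised: success iff all counts ≤ k, all target slots free, counts distinct;
-- on success the result is the sequence of slot writes.
lemma pv_pyrFill_eq (its : List (Char × Int)) (k : Int) :
    ∀ slots : List (Option Char), (∀ p ∈ its, 1 ≤ p.2) → slots.length = k.toNat + 1 →
    pyrFill its slots k =
      if (∀ p ∈ its, p.2 ≤ k ∧ slots.getD p.2.toNat none = none) ∧ (its.map Prod.snd).Nodup
      then some (its.foldl (fun sl p => sl.set p.2.toNat (some p.1)) slots)
      else none := by
  induction its with
  | nil => intro slots _ _; simp [pyrFill]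
  | cons p rest ih =>
    intro slots hpos hlen
    obtain ⟨ch, n⟩ := p
    have hn1 : (1 : Int) ≤ n := hpos (ch, n) (by simp)
    by_cases hg : n > k ∨ slots.getD n.toNat none ≠ none
    · rw [pyrFill, if_pos hg, if_neg]
      rintro ⟨hall, -⟩
      obtain ⟨h1, h2⟩ := hall (ch, n) (by simp)
      rcases hg with hg | hg
      · omega
      · exact hg h2
    · rw [not_or, not_lt, not_not] at hg
      obtain ⟨hnk, hfree⟩ := hg
      have hnlt : n.toNat < slots.length := by omega
      rw [pyrFill, if_neg (by rw [not_or, not_lt, not_not]; exact ⟨hnk, hfree⟩)]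
      rw [ih (slots.set n.toNat (some ch)) (fun q hq => hpos q (List.mem_cons_of_mem _ hq))
          (by simpa using hlen)]
      have hset_self : (slots.set n.toNat (some ch)).getD n.toNat none = some ch :=
        pv_getD_set_self _ _ hnlt _
      by_cases hC : (∀ q ∈ rest, q.2 ≤ k ∧ slots.getD q.2.toNat none = none)
          ∧ n ∉ rest.map Prod.snd ∧ (rest.map Prod.snd).Nodup
      · obtain ⟨hall, hnot, hnd⟩ := hC
        rw [if_pos, if_pos]
        · simp [List.foldl_cons]
        · refine ⟨fun q hq => ?_, ?_⟩
          · rcases List.mem_cons.mp hq with hq | hq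
            · subst hq; exact ⟨hnk, hfree⟩
            · exact hall q hq
          · rw [List.map_cons, List.nodup_cons]; exact ⟨hnot, hnd⟩
        · refine ⟨fun q hq => ⟨(hall q hq).1, ?_⟩, hnd⟩
          have hne : q.2.toNat ≠ n.toNat := by
            have hq2 : q.2 ≠ n := fun h => hnot (List.mem_map.mpr ⟨q, hq, h⟩)
            have hq1 : (1 : Int) ≤ q.2 := hpos q (List.mem_cons_of_mem _ hq)
            omega
          rw [pv_getD_set_ne _ _ _ (Ne.symm hne)]
          exact (hall q hq).2
      · rw [if_neg, if_neg]
        · intro hc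
          apply hC
          obtain ⟨hall, hnd⟩ := hc
          rw [List.map_cons, List.nodup_cons] at hnd
          exact ⟨fun q hq => hall q (List.mem_cons_of_mem _ hq), hnd.1, hnd.2⟩
        · intro hc
          apply hC
          obtain ⟨hall, hnd⟩ := hc
          refine ⟨fun q hq => ⟨(hall q hq).1, ?_⟩, ?_, hnd⟩
          · have h2 := (hall q hq).2
            by_cases hqe : q.2.toNat = n.toNat
            · rw [hqe, hset_self] at h2; cases h2
            · rwa [pv_getD_set_ne _ _ _ (Ne.symm hqe)] at h2
          · intro hmem
            obtain ⟨q, hq, hqn⟩ := List.mem_map.mp hmem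
            have h2 := (hall q hq).2
            have he : q.2.toNat = n.toNat := by rw [hqn]
            rw [he, hset_self] at h2
            cases h2

-- slots writes: a position whose value is absent from the items is untouched
lemma pv_foldl_set_untouched (its : List (Char × Int)) (m : Nat) :
    ∀ slots : List (Option Char), (∀ p ∈ its, p.2.toNat ≠ m) →
    (its.foldl (fun sl p => sl.set p.2.toNat (some p.1)) slots).getD m none = slots.getD m none := by
  induction its with
  | nil => intro slots _; rfl
  | cons p rest ih =>
    intro slots h
    rw [List.foldl_cons, ih _ (fun q hq => h q (by simp [hq])),
      pv_getD_set_ne _ _ _ (h p (by simp))]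

-- each item's character lands in its slot
lemma pv_foldl_set_mem (its : List (Char × Int)) :
    ∀ slots : List (Option Char), (its.map Prod.snd).Nodup →
    (∀ p ∈ its, 1 ≤ p.2) → (∀ p ∈ its, p.2.toNat < slots.length) →
    ∀ p ∈ its, (its.foldl (fun sl p => sl.set p.2.toNat (some p.1)) slots).getD p.2.toNat none = some p.1 := by
  induction its with
  | nil => intro slots _ _ _ p hp; cases hp
  | cons q rest ih =>
    intro slots hnd hpos hlt p hp
    rw [List.map_cons, List.nodup_cons] at hnd
    rw [List.foldl_cons]
    rcases List.mem_cons.mp hp with hp | hp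
    · subst hp
      rw [pv_foldl_set_untouched]
      · exact pv_getD_set_self _ _ (hlt p (List.mem_cons_self ..)) _
      · intro r hr
        have h1 : (1 : Int) ≤ r.2 := hpos r (List.mem_cons_of_mem _ hr)
        have h2 : (1 : Int) ≤ p.2 := hpos p (List.mem_cons_self ..)
        have : r.2 ≠ p.2 := fun h => hnd.1 (List.mem_map.mpr ⟨r, hr, h⟩)
        omega
    · exact ih _ hnd.2 (fun r hr => hpos r (List.mem_cons_of_mem _ hr))
        (fun r hr => by simpa using hlt r (List.mem_cons_of_mem _ hr)) p hp

-- values a permutation of 1..k ⟺ the frequency column of the sorted item list is 1..k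
lemma pv_perm_iff_sorted_map (items : List (Char × Int)) :
    (items.map Prod.snd).Perm (PySem.List.pyRange 1 ((items.length : Int) + 1) 1)
    ↔ (PySem.List.sorted items (fun p => p.2) false).map (·.2)
        = PySem.List.pyRange 1 ((items.length : Int) + 1) 1 := by
  have hperm : ((PySem.List.sorted items (fun p => p.2) false).map (·.2)).Perm (items.map Prod.snd) :=
    (PySem.List.sorted_perm items (fun p => p.2) false).map _
  constructor
  · intro h
    exact List.Perm.eq_of_pairwise (fun a b _ _ h1 h2 => le_antisymm h1 h2)
      (PySem.List.sorted_map_key_pairwise items (fun p => p.2))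
      ((PySem.List.pairwise_lt_pyRange_one _ _).imp le_of_lt) (hperm.trans h)
  · intro h
    exact (h ▸ hperm).symm

-- success condition of pyrFill ⟺ values permutation of 1..k (for k values all ≥ 1)
lemma pv_cond_iff_perm (items : List (Char × Int)) (hpos : ∀ p ∈ items, 1 ≤ p.2) :
    ((∀ p ∈ items, p.2 ≤ (items.length : Int)
        ∧ (List.replicate (items.length + 1) (none : Option Char)).getD p.2.toNat none = none)
      ∧ (items.map Prod.snd).Nodup)
    ↔ (items.map Prod.snd).Perm (PySem.List.pyRange 1 ((items.length : Int) + 1) 1) := by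
  have hrep : ∀ (m : Nat), (List.replicate (items.length + 1) (none : Option Char)).getD m none = none := by
    intro m
    rcases Nat.lt_or_ge m (items.length + 1) with h | h
    · simp [List.getD, List.getElem?_eq_getElem (by simpa using h : m < (List.replicate (items.length + 1) (none : Option Char)).length)]
    · simp [List.getD, List.getElem?_eq_none (by simpa using h : (List.replicate (items.length + 1) (none : Option Char)).length ≤ m)]
  constructor
  · rintro ⟨hall, hnd⟩
    have hsub : items.map Prod.snd ⊆ PySem.List.pyRange 1 ((items.length : Int) + 1) 1 := by
      intro v hv
      obtain ⟨p, hp, hpv⟩ := List.mem_map.mp hv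
      rw [PySem.List.mem_pyRange_one]
      have := hall p hp
      have := hpos p hp
      omega
    have hsp := List.subperm_of_subset hnd hsub
    refine hsp.perm_of_length_le ?_
    rw [PySem.List.length_pyRange_one, List.length_map]
    omega
  · intro hperm
    refine ⟨fun p hp => ⟨?_, hrep _⟩, hperm.nodup_iff.mpr (PySem.List.nodup_pyRange_one _ _)⟩
    have : p.2 ∈ PySem.List.pyRange 1 ((items.length : Int) + 1) 1 :=
      hperm.subset (List.mem_map.mpr ⟨p, hp, rfl⟩)
    rw [PySem.List.mem_pyRange_one] at this
    omega

-- In the pyramid case the sorted item list is exactly the walk n = 1..k through the slot array.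
lemma pv_sorted_eq_map_range (items : List (Char × Int)) (F : List (Option Char))
    (hF : ∀ p ∈ items, F.getD p.2.toNat none = some p.1)
    (hLR : (PySem.List.sorted items (fun p => p.2) false).map (·.2)
            = PySem.List.pyRange 1 ((items.length : Int) + 1) 1) :
    PySem.List.sorted items (fun p => p.2) false
      = (PySem.List.pyRange 1 ((items.length : Int) + 1) 1).map
          (fun n => ((F.getD n.toNat none).getD ' ', n)) := by
  apply List.ext_getElem
  · simp [PySem.List.length_sorted, PySem.List.length_pyRange_one]
  · intro j hj1 hj2
    have hj1' : j < ((PySem.List.sorted items (fun p => p.2) false).map (·.2)).length := by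
      simpa using hj1
    have hsnd : ((PySem.List.sorted items (fun p => p.2) false)[j]'hj1).2 = 1 + (j : Int) := by
      have := List.getElem_of_eq hLR hj1'
      simpa [PySem.List.getElem_pyRange_one] using this
    have hmem : (PySem.List.sorted items (fun p => p.2) false)[j]'hj1 ∈ items :=
      (PySem.List.sorted_perm items (fun p => p.2) false).mem_iff.mp (List.getElem_mem hj1)
    rw [List.getElem_map, PySem.List.getElem_pyRange_one]
    refine Prod.ext ?_ (by simpa using hsnd)
    have hlook := hF _ hmem
    rw [hsnd] at hlook
    simp only [hlook, Option.getD_some]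

-- ===== VERDICT (by name: the statement is the Claim_ definition above) =====
theorem pyramidify_spec : Claim_equal_pyramidify := by
  intro word _ hpre
  have hxs : word.toList ≠ [] := hpre
  unfold Spec_pyramidify pyramidify pyramidify_alt
  have hitems : (PySem.Dict.counter word.toList (κ := Char)).items
      = (PySem.Set.ofList word.toList).map (fun k => (k, (List.count k word.toList : Int))) :=
    PySem.Dict.items_counter word.toList
  have hine : (PySem.Dict.counter word.toList (κ := Char)).items ≠ [] := by
    rw [hitems]
    obtain ⟨c, hc⟩ := List.exists_mem_of_ne_nil _ hxs
    exact List.ne_nil_of_mem (List.mem_map.mpr ⟨c, (PySem.Set.mem_ofList _ _).mpr hc, rfl⟩)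
  have hpos : ∀ p ∈ (PySem.Dict.counter word.toList (κ := Char)).items, (1 : Int) ≤ p.2 := by
    intro p hp
    rw [hitems] at hp
    obtain ⟨c, hc, hcp⟩ := List.mem_map.mp hp
    have : c ∈ word.toList := (PySem.Set.mem_ofList _ _).mp hc
    have : 1 ≤ List.count c word.toList := List.one_le_count_iff.mpr this
    subst hcp
    simpa using this
  set items := (PySem.Dict.counter word.toList (κ := Char)).items with hitemsdef
  set s := PySem.List.sorted items (fun p => p.2) false with hs
  have hslen : s.length = items.length := PySem.List.length_sorted items _ false
  have hsne : 0 < s.length := by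
    rw [hslen]; exact List.length_pos_iff.mpr hine
  have hget : PySem.List.pyGet? s 0 = some (s[0]'hsne) := by
    have := PySem.List.pyGet?_natCast s 0
    simpa [List.getElem?_eq_getElem hsne] using this
  have hsizeN : (PySem.Dict.counter word.toList (κ := Char)).size = items.length := rfl
  simp only [hget, hsizeN, ← hitemsdef]
  -- A's guard ⟺ s.map snd = range
  have hcondA : ((s[0]'hsne).2 = 1 ∧ ∀ i ∈ PySem.List.pyRange 0 ((s.length : Int) - 1) 1,
        (PySem.List.pyGetD s i ('a', 0)).2 = (PySem.List.pyGetD s (i + 1) ('a', 0)).2 - 1)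
      ↔ s.map (·.2) = PySem.List.pyRange 1 ((items.length : Int) + 1) 1 := by
    rw [pv_all_iff_steps s]
    have h0 : 0 < (s.map (·.2)).length := by simpa using hsne
    have hiff := pv_steps_iff_range (s.map (·.2)) h0
    constructor
    · rintro ⟨h1, hstep⟩
      have := hiff.mp ⟨by simpa using h1, fun j h => by
        have h' : j + 1 < s.length := by simpa using h
        simpa using hstep j h'⟩
      simpa [hslen] using this
    · intro hmap
      have h2 := hiff.mpr (by simpa [hslen] using hmap)
      exact ⟨by simpa using h2.1, fun j h => by
        have := h2.2 j (by simpa using h)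
        simpa using this⟩
  -- B's fill characterised
  have hfill := pv_pyrFill_eq items ((items.length : Int)) (List.replicate (items.length + 1) none)
      hpos (by simp)
  by_cases hP : s.map (·.2) = PySem.List.pyRange 1 ((items.length : Int) + 1) 1
  · -- pyramid case
    have hperm : (items.map Prod.snd).Perm (PySem.List.pyRange 1 ((items.length : Int) + 1) 1) :=
      (pv_perm_iff_sorted_map items).mpr (hs ▸ hP)
    have hcond := (pv_cond_iff_perm items hpos).mpr hperm
    rw [hfill, if_pos hcond]
    rw [if_pos (hcondA.mpr hP)]
    set F := items.foldl (fun sl p => sl.set p.2.toNat (some p.1))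
        (List.replicate (items.length + 1) (none : Option Char)) with hFdef
    have hFmem : ∀ p ∈ items, F.getD p.2.toNat none = some p.1 := by
      apply pv_foldl_set_mem items _ hcond.2 hpos
      intro p hp
      have := (hcond.1 p hp).1
      have := hpos p hp
      simp only [List.length_replicate]
      omega
    have hseq := pv_sorted_eq_map_range items F hFmem (hs ▸ hP)
    rw [← hs] at hseq
    rw [hseq, List.foldl_map]
  · -- not a pyramid
    have hnperm : ¬ ((∀ p ∈ items, p.2 ≤ (items.length : Int)
        ∧ (List.replicate (items.length + 1) (none : Option Char)).getD p.2.toNat none = none)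
      ∧ (items.map Prod.snd).Nodup) := by
      intro hc
      apply hP
      rw [hs]
      exact (pv_perm_iff_sorted_map items).mp ((pv_cond_iff_perm items hpos).mp hc)
    rw [hfill, if_neg hnperm, if_neg (fun hc => hP (hcondA.mp hc))]
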